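-- pv_equiv track=rewrite | github.com/adarshw20/Healthcare-Recommendation-System | backend/app.py | analyze_symptoms
-- ===== SOURCE A (Python) =====
-- def analyze_symptoms(symptoms):
--     """Analyze symptoms and return appropriate condition key with severity assessment"""
--     if not symptoms:
--         return 'general'
--
--     symptoms_lower = [s.lower().replace(' ', '_') for s in symptoms]
--     symptom_count = len(symptoms_lower)
--
--     # Check for migraine pattern
--     migraine_symptoms = {'severe_headache', 'nausea', 'vomiting', 'light_sensitivity', 'sound_sensitivity', 'aura'}
--     if len(set(symptoms_lower) & migraine_symptoms) >= 3:
--         return 'migraine'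
--
--     # Check for gastroenteritis
--     gi_symptoms = {'nausea', 'vomiting', 'diarrhea', 'abdominal_cramps', 'fever'}
--     if len(set(symptoms_lower) & gi_symptoms) >= 3:
--         return 'gastroenteritis'
--
--     # Check for fever-related conditions
--     if 'fever' in symptoms_lower:
--         if 'headache' in symptoms_lower or 'body_aches' in symptoms_lower:
--             return 'fever_headache'
--
--     # Check for respiratory conditions
--     respiratory_symptoms = {'cough', 'fatigue', 'shortness_of_breath', 'chest_discomfort', 'sore_throat'}
--     if len(set(symptoms_lower) & respiratory_symptoms) >= 2:
--         return 'cough_fatigue'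
--
--     # If no specific pattern matches
--     return 'general'
-- ===== SOURCE B (Python) =====
-- _MIGRAINE = ('severe_headache', 'nausea', 'vomiting', 'light_sensitivity',
--              'sound_sensitivity', 'aura')
-- _GI = ('nausea', 'vomiting', 'diarrhea', 'abdominal_cramps', 'fever')
-- _RESP = ('cough', 'fatigue', 'shortness_of_breath', 'chest_discomfort', 'sore_throat')
--
--
-- def analyze_symptoms(symptoms):
--     """Analyze symptoms and return appropriate condition key with severity assessment"""
--     if not symptoms:
--         return 'general'
--     seen = set()
--     mig = gi = resp = 0
--     fever = headache = aches = False
--     for raw in symptoms: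
--         x = raw.lower().replace(' ', '_')
--         if x in seen:
--             continue
--         seen.add(x)
--         if x in _MIGRAINE:
--             mig += 1
--         if x in _GI:
--             gi += 1
--         if x in _RESP:
--             resp += 1
--         if x == 'fever':
--             fever = True
--         elif x == 'headache':
--             headache = True
--         elif x == 'body_aches':
--             aches = True
--     if mig >= 3:
--         return 'migraine'
--     if gi >= 3:
--         return 'gastroenteritis'
--     if fever and (headache or aches):
--         return 'fever_headache'
--     if resp >= 2:
--         return 'cough_fatigue'
--     return 'general'
-- ===== Notes on version B (the rewrite author's own statement) =====
-- stated objective: alternative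
-- what changed: B is a single streaming pass over the raw symptom list maintaining per-category counters and boolean flags (with a seen-set for dedup), deciding at the end; A first normalizes the whole list, then builds fresh set intersections branch by branch.
import Mathlib
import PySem

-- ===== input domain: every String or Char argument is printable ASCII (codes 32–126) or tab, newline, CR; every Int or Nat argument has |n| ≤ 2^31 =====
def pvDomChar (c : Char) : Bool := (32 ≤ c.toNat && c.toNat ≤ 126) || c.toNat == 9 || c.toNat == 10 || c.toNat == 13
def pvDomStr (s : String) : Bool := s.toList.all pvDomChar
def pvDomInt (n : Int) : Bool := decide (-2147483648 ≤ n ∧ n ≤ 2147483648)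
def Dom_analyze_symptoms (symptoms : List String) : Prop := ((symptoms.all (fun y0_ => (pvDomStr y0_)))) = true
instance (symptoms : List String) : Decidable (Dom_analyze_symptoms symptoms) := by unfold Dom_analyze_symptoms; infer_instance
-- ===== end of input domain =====

-- ===== PORT A =====
-- B streams once over the raw list with counters and flags instead of A's
-- staged set intersections; same result, different decomposition.
def analyze_symptoms (symptoms : List String) : String :=
  if symptoms = [] then "general"
  else
    let symptoms_lower := symptoms.map (fun s => PySem.Str.replace (PySem.Str.lower s) " " "_")
    let _symptom_count := symptoms_lower.length
    let migraine_symptoms : PySem.Set String := PySem.Set.ofList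
      ["severe_headache", "nausea", "vomiting", "light_sensitivity", "sound_sensitivity", "aura"]
    if 3 ≤ PySem.Set.len (PySem.Set.inter (PySem.Set.ofList symptoms_lower) migraine_symptoms) then
      "migraine"
    else
      let gi_symptoms : PySem.Set String := PySem.Set.ofList
        ["nausea", "vomiting", "diarrhea", "abdominal_cramps", "fever"]
      if 3 ≤ PySem.Set.len (PySem.Set.inter (PySem.Set.ofList symptoms_lower) gi_symptoms) then
        "gastroenteritis"
      else if symptoms_lower.contains "fever" &&
              (symptoms_lower.contains "headache" || symptoms_lower.contains "body_aches") then
        "fever_headache"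
      else
        let respiratory_symptoms : PySem.Set String := PySem.Set.ofList
          ["cough", "fatigue", "shortness_of_breath", "chest_discomfort", "sore_throat"]
        if 2 ≤ PySem.Set.len (PySem.Set.inter (PySem.Set.ofList symptoms_lower) respiratory_symptoms) then
          "cough_fatigue"
        else "general"

-- ===== PORT B =====
def pvMIG : List String :=
  ["severe_headache", "nausea", "vomiting", "light_sensitivity", "sound_sensitivity", "aura"]
def pvGI : List String := ["nausea", "vomiting", "diarrhea", "abdominal_cramps", "fever"]
def pvRESP : List String :=
  ["cough", "fatigue", "shortness_of_breath", "chest_discomfort", "sore_throat"]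

structure PvState where
  seen : PySem.Set String
  mig : Nat
  gi : Nat
  resp : Nat
  fever : Bool
  headache : Bool
  aches : Bool
deriving Repr, DecidableEq

def pvNorm (raw : String) : String := PySem.Str.replace (PySem.Str.lower raw) " " "_"

def pvStep (st : PvState) (raw : String) : PvState :=
  let x := pvNorm raw
  if PySem.Set.contains st.seen x then st
  else
    { seen := PySem.Set.add st.seen x
      mig := st.mig + (if pvMIG.contains x then 1 else 0)
      gi := st.gi + (if pvGI.contains x then 1 else 0)
      resp := st.resp + (if pvRESP.contains x then 1 else 0)
      fever := if x == "fever" then true else st.fever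
      headache := if x == "fever" then st.headache
                  else if x == "headache" then true else st.headache
      aches := if x == "fever" then st.aches
               else if x == "headache" then st.aches
               else if x == "body_aches" then true else st.aches }

def analyze_symptoms_alt (symptoms : List String) : String :=
  if symptoms = [] then "general"
  else
    let st := symptoms.foldl pvStep ⟨PySem.Set.empty, 0, 0, 0, false, false, false⟩
    if 3 ≤ st.mig then "migraine"
    else if 3 ≤ st.gi then "gastroenteritis"
    else if st.fever && (st.headache || st.aches) then "fever_headache"
    else if 2 ≤ st.resp then "cough_fatigue"
    else "general"

-- ===== PRECONDITION & SPEC =====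
def Spec_analyze_symptoms (symptoms : List String) (out : String) : Prop := out = analyze_symptoms_alt symptoms
instance (symptoms : List String) (out : String) : Decidable (Spec_analyze_symptoms symptoms out) := by unfold Spec_analyze_symptoms; infer_instance

-- ===== CLAIM =====
def Claim_equal_analyze_symptoms : Prop := ∀ (symptoms : List String), Dom_analyze_symptoms symptoms → Spec_analyze_symptoms symptoms (analyze_symptoms symptoms)

-- ===== LEMMAS AND PROOFS =====

-- The state determined by the set of normalized symptoms seen so far.
def pvMk (S : PySem.Set String) : PvState :=
  ⟨S, S.countP (fun x => pvMIG.contains x), S.countP (fun x => pvGI.contains x),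
    S.countP (fun x => pvRESP.contains x),
    S.contains "fever", S.contains "headache", S.contains "body_aches"⟩

set_option maxHeartbeats 1000000 in
theorem pvStep_mk (S : PySem.Set String) (y : String) :
    pvStep (pvMk S) y = pvMk (PySem.Set.add S (pvNorm y)) := by
  by_cases h : pvNorm y ∈ S
  · have hc : PySem.Set.contains S (pvNorm y) = true := by simp [h]
    simp [pvStep, pvMk, h, hc, PySem.Set.add_of_mem h]
  · have hc : PySem.Set.contains S (pvNorm y) = false := by simp [h]
    rw [PySem.Set.add_of_not_mem h]
    simp only [pvStep, pvMk, hc, Bool.false_eq_true, if_false]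
    rw [PvState.mk.injEq]
    refine ⟨PySem.Set.add_of_not_mem h, ?_, ?_, ?_, ?_, ?_, ?_⟩
    · simp [List.countP_append, List.countP_cons]
    · simp [List.countP_append, List.countP_cons]
    · simp [List.countP_append, List.countP_cons]
    · by_cases hf : pvNorm y = "fever" <;>
        simp [hf, Ne.symm, List.contains_iff_mem, List.mem_append]
    · by_cases hf : pvNorm y = "fever"
      · simp [hf, List.contains_iff_mem, List.mem_append]
      · by_cases hh : pvNorm y = "headache" <;>
          simp [hf, hh, Ne.symm, List.contains_iff_mem, List.mem_append]
    · by_cases hf : pvNorm y = "fever"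
      · simp [hf, List.contains_iff_mem, List.mem_append]
      · by_cases hh : pvNorm y = "headache"
        · simp [hf, hh, List.contains_iff_mem, List.mem_append]
        · by_cases hb : pvNorm y = "body_aches" <;>
            simp [hf, hh, hb, Ne.symm, List.contains_iff_mem, List.mem_append]

theorem pvFold_mk (ys : List String) (S : PySem.Set String) :
    ys.foldl pvStep (pvMk S) = pvMk (PySem.Set.update S (ys.map pvNorm)) := by
  induction ys generalizing S with
  | nil => simp [PySem.Set.update]
  | cons y ys ih =>
      simp only [List.foldl_cons, List.map_cons, PySem.Set.update_cons, pvStep_mk, ih]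

-- |set(ys) & R| (A's intersection size) equals the number of elements of set(ys)
-- that lie in the rule list R (B's counter).
theorem pv_inter_len_eq (ys R : List String) (hR : R.Nodup) :
    PySem.Set.len (PySem.Set.inter (PySem.Set.ofList ys) R) =
      (PySem.Set.ofList ys).countP (fun x => R.contains x) := by
  have _ := hR
  have h1 : (PySem.Set.inter (PySem.Set.ofList ys) R).Nodup :=
    PySem.Set.nodup_inter _ _ (PySem.Set.nodup_ofList ys)
  have h2 : ((PySem.Set.ofList ys).filter (fun x => R.contains x)).Nodup :=
    (PySem.Set.nodup_ofList ys).filter _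
  have hp : (PySem.Set.inter (PySem.Set.ofList ys) R).Perm
      ((PySem.Set.ofList ys).filter (fun x => R.contains x)) := by
    rw [List.perm_ext_iff_of_nodup h1 h2]
    intro a
    simp [PySem.Set.mem_inter, List.mem_filter]
  simp [PySem.Set.len, hp.length_eq, List.countP_eq_length_filter]

-- ===== VERDICT =====
theorem analyze_symptoms_spec : Claim_equal_analyze_symptoms := by
  intro symptoms _
  unfold Spec_analyze_symptoms analyze_symptoms analyze_symptoms_alt
  by_cases h : symptoms = []
  · simp [h]
  · simp only [h, if_false]
    set ys := symptoms.map (fun s => PySem.Str.replace (PySem.Str.lower s) " " "_") with hys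
    have hmap : symptoms.map pvNorm = ys := rfl
    have hfold : symptoms.foldl pvStep ⟨PySem.Set.empty, 0, 0, 0, false, false, false⟩ =
        pvMk (PySem.Set.ofList ys) := by
      have h0 : (⟨PySem.Set.empty, 0, 0, 0, false, false, false⟩ : PvState) =
          pvMk ([] : PySem.Set String) := by rfl
      rw [h0, pvFold_mk, hmap, PySem.Set.update_nil_left]
    rw [hfold]
    rw [pv_inter_len_eq ys _ (by decide), pv_inter_len_eq ys _ (by decide),
        pv_inter_len_eq ys _ (by decide)]
    have e1 : (PySem.Set.ofList ["severe_headache", "nausea", "vomiting", "light_sensitivity",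
        "sound_sensitivity", "aura"] : List String) = pvMIG := by decide
    have e2 : (PySem.Set.ofList ["nausea", "vomiting", "diarrhea", "abdominal_cramps", "fever"] :
        List String) = pvGI := by decide
    have e3 : (PySem.Set.ofList ["cough", "fatigue", "shortness_of_breath", "chest_discomfort",
        "sore_throat"] : List String) = pvRESP := by decide
    rw [e1, e2, e3]
    have hc : ∀ a : String, (PySem.Set.ofList ys).contains a = ys.contains a := by
      intro a
      simp [List.contains_iff_mem, PySem.Set.mem_ofList]
    simp only [pvMk, hc]
    norm_cast
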